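-- pv_equiv track=rewrite | github.com/ezhivodiorov/checkio | Strings Theory/Caps Lock.py | caps_lock
-- ===== SOURCE A (Python) =====
-- def caps_lock(text: str) -> str:
--     uppLock = False
--     new_text = ''
--
--     for i in text:
--         if i.isupper():
--             new_text +=i
--         elif i.lower() == 'a':
--             uppLock = not uppLock
--         else:
--             new_text += i.upper() if uppLock else i.lower()
--
--     return new_text
-- ===== SOURCE B (Python) =====
-- def caps_lock(text: str) -> str:
--     # Split on lowercase 'a': each boundary is a caps-lock toggle, so segment
--     # index parity replaces the running boolean state.
--     return ''.join(
--         ''.join(ch if ch.isupper() else (ch.upper() if idx % 2 else ch.lower())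
--                 for ch in part)
--         for idx, part in enumerate(text.split('a'))
--     )
-- ===== Notes on version B (the rewrite author's own statement) =====
-- stated objective: alternative
-- what changed: Replaced the per-character running caps-lock boolean with a split on 'a' followed by per-segment processing, where segment index parity encodes the caps-lock state.
import Mathlib
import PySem

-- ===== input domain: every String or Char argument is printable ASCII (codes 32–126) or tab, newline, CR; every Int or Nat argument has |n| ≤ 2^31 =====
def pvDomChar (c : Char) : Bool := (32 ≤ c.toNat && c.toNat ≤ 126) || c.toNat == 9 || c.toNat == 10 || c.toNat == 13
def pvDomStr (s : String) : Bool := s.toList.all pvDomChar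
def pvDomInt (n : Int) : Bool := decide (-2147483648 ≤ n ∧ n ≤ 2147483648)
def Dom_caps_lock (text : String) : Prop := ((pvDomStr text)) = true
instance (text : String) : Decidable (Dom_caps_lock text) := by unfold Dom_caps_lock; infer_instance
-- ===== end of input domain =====

-- B replaces A's per-character running caps-lock boolean by splitting on 'a' and
-- processing segments, with segment-index parity as the caps-lock state (alternative decomposition).


-- ===== PORT A =====
-- literal port of A: fold over the characters carrying the state (uppLock, new_text)
def caps_lock (text : String) : String :=
  String.mk ((text.toList.foldl (fun st c =>
    if PySem.Chars.isupper c then (st.1, st.2 ++ [c])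
    else if PySem.Chars.lowerChar c = 'a' then (!st.1, st.2)
    else (st.1, st.2 ++ [if st.1 then PySem.Chars.upperChar c else PySem.Chars.lowerChar c]))
    ((false : Bool), ([] : List Char))).2)

-- ===== PORT B =====
-- literal port of B: split on 'a', transform each segment by its index parity, join
def caps_lock_alt (text : String) : String :=
  String.mk (PySem.Chars.join []
    ((PySem.List.enumerate (PySem.Chars.splitOn text.toList ['a']) 0).map
      (fun p => p.2.map (fun ch =>
        if PySem.Chars.isupper ch then ch
        else if PySem.Int.mod p.1 2 ≠ 0 then PySem.Chars.upperChar ch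
        else PySem.Chars.lowerChar ch))))

-- ===== PRECONDITION & SPEC =====
def Spec_caps_lock (text : String) (out : String) : Prop := out = caps_lock_alt text
instance (text : String) (out : String) : Decidable (Spec_caps_lock text out) := by unfold Spec_caps_lock; infer_instance

-- ===== CLAIM (what is proved, stated in full; the proofs are below) =====
def Claim_equal_caps_lock : Prop := ∀ (text : String), Dom_caps_lock text → Spec_caps_lock text (caps_lock text)

-- ===== LEMMAS AND PROOFS =====

-- A's loop, as structural recursion on the characters (state = caps-lock flag)
def runA (b : Bool) : List Char → List Char
  | [] => []
  | c :: cs =>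
    if PySem.Chars.isupper c then c :: runA b cs
    else if PySem.Chars.lowerChar c = 'a' then runA (!b) cs
    else (if b then PySem.Chars.upperChar c else PySem.Chars.lowerChar c) :: runA b cs

-- structural splitter on 'a' (reference form of splitOn for the 1-char separator)
def split1 : List Char → List (List Char)
  | [] => [[]]
  | c :: cs => if c = 'a' then [] :: split1 cs else (split1 cs).modifyHead (c :: ·)

-- one segment of B, with an explicit caps-lock flag
def segB (b : Bool) (p : List Char) : List Char :=
  p.map (fun ch => if PySem.Chars.isupper ch then ch
                   else if b then PySem.Chars.upperChar ch else PySem.Chars.lowerChar ch)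

-- B's join over enumerated segments, with index parity made an explicit alternating flag
def altRec (b : Bool) : List (List Char) → List Char
  | [] => []
  | p :: ps => segB b p ++ altRec (!b) ps

lemma split1_ne_nil : ∀ cs : List Char, split1 cs ≠ []
  | [] => by simp [split1]
  | c :: cs => by
    simp only [split1]
    split
    · simp
    · cases h : split1 cs with
      | nil => exact absurd h (split1_ne_nil cs)
      | cons p ps => simp

lemma foldA (cs : List Char) (b : Bool) (acc : List Char) :
    (cs.foldl (fun st c =>
      if PySem.Chars.isupper c then (st.1, st.2 ++ [c])
      else if PySem.Chars.lowerChar c = 'a' then (!st.1, st.2)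
      else (st.1, st.2 ++ [if st.1 then PySem.Chars.upperChar c else PySem.Chars.lowerChar c]))
      (b, acc)).2 = acc ++ runA b cs := by
  induction cs generalizing b acc with
  | nil => simp [runA]
  | cons c cs ih =>
    simp only [List.foldl_cons, runA]
    split_ifs with h1 h2 <;> simp [ih]

lemma go_spec : ∀ (fuel : Nat) (l : List Char), l.length ≤ fuel → ∀ (cur : List Char) (acc : List (List Char)),
    PySem.Chars.splitOn.go ['a'] fuel l cur acc =
      acc.reverse ++ (cur.reverse ++ (split1 l).headI) :: (split1 l).tail
  | 0, l, h, cur, acc => by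
    have hl : l = [] := by cases l <;> simp_all
    subst hl
    simp [PySem.Chars.splitOn.go, split1]
  | (f+1), [], _, cur, acc => by
    simp [PySem.Chars.splitOn.go, split1]
  | (f+1), c :: rest, h, cur, acc => by
    have hr : rest.length ≤ f := by simpa using h
    by_cases hc : c = 'a'
    · subst hc
      have hstep : PySem.Chars.splitOn.go ['a'] (f+1) ('a'::rest) cur acc
          = PySem.Chars.splitOn.go ['a'] f rest [] (cur.reverse :: acc) := by
        simp [PySem.Chars.splitOn.go, List.isPrefixOf]
      rw [hstep, go_spec f rest hr]
      cases hsp : split1 rest with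
      | nil => exact absurd hsp (split1_ne_nil rest)
      | cons p ps => simp [split1, hsp]
    · have hstep : PySem.Chars.splitOn.go ['a'] (f+1) (c::rest) cur acc
          = PySem.Chars.splitOn.go ['a'] f rest (c :: cur) acc := by
        simp [PySem.Chars.splitOn.go, List.isPrefixOf]
        intro hh; exact absurd hh.symm hc
      rw [hstep, go_spec f rest hr]
      cases hsp : split1 rest with
      | nil => exact absurd hsp (split1_ne_nil rest)
      | cons p ps => simp [split1, hc, hsp, List.modifyHead]

lemma splitOn_eq_split1 (cs : List Char) :
    PySem.Chars.splitOn cs ['a'] = split1 cs := by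
  have := go_spec (cs.length + 1) cs (by omega) [] []
  cases hsp : split1 cs with
  | nil => exact absurd hsp (split1_ne_nil cs)
  | cons p ps =>
    rw [hsp] at this
    simpa [PySem.Chars.splitOn, hsp] using this

lemma runA_eq_altRec (cs : List Char) (b : Bool) :
    runA b cs = altRec b (split1 cs) := by
  induction cs generalizing b with
  | nil => simp [runA, split1, altRec, segB]
  | cons c cs ih =>
    by_cases hc : c = 'a'
    · subst hc
      simp only [runA, split1]
      have hup : PySem.Chars.isupper 'a' = false := by decide
      have hlo : PySem.Chars.lowerChar 'a' = 'a' := by decide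
      have halt : altRec b ([] :: split1 cs) = altRec (!b) (split1 cs) := by
        simp [altRec, segB]
      simp [hup, hlo, ih, halt]
    · have hlo : ¬ PySem.Chars.isupper c = true → PySem.Chars.lowerChar c ≠ 'a' := by
        intro h1
        simp [PySem.Chars.lowerChar, h1, hc]
      cases hsp : split1 cs with
      | nil => exact absurd hsp (split1_ne_nil cs)
      | cons p ps =>
        simp only [split1, if_neg hc, hsp, List.modifyHead, altRec, segB, List.map_cons]
        by_cases hu : PySem.Chars.isupper c
        · simp only [runA, if_pos hu, ih, hsp, altRec, segB]
          simp
        · simp only [runA, if_neg hu, if_neg (hlo (by simpa using hu)), ih, hsp, altRec, segB]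
          simp

lemma join_nil_cons (x : List Char) (xs : List (List Char)) :
    PySem.Chars.join [] (x :: xs) = x ++ PySem.Chars.join [] xs := by
  cases xs with
  | nil => simp [PySem.Chars.join, List.intercalate]
  | cons y r => rw [PySem.Chars.join_cons_cons]; simp

lemma join_altRec (parts : List (List Char)) (n : Nat) :
    PySem.Chars.join [] ((PySem.List.enumerate parts (n : Int)).map
      (fun p => p.2.map (fun ch =>
        if PySem.Chars.isupper ch then ch
        else if PySem.Int.mod p.1 2 ≠ 0 then PySem.Chars.upperChar ch
        else PySem.Chars.lowerChar ch))) = altRec (decide (n % 2 = 1)) parts := by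
  induction parts generalizing n with
  | nil => simp [PySem.List.enumerate, altRec, PySem.Chars.join, List.intercalate]
  | cons p ps ih =>
    rw [PySem.List.enumerate_cons, List.map_cons, join_nil_cons, altRec]
    have hseg : p.map (fun ch =>
        if PySem.Chars.isupper ch then ch
        else if PySem.Int.mod ((n : Int)) 2 ≠ 0 then PySem.Chars.upperChar ch
        else PySem.Chars.lowerChar ch) = segB (decide (n % 2 = 1)) p := by
      unfold segB
      have h2 : ((n : Int) % 2 = 1) ↔ (n % 2 = 1) := by omega
      by_cases hp : n % 2 = 1 <;> simp [h2, hp]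
    have hnext : ((n : Int) + 1) = ((n + 1 : Nat) : Int) := by push_cast; ring
    rw [hseg, hnext, ih (n + 1)]
    have hflip : decide ((n + 1) % 2 = 1) = !decide (n % 2 = 1) := by
      by_cases hp : n % 2 = 1 <;> simp [hp] <;> omega
    rw [hflip]

-- ===== VERDICT (by name: the statement is the Claim_ definition above) =====
theorem caps_lock_spec : Claim_equal_caps_lock := by
  intro text _
  unfold Spec_caps_lock caps_lock caps_lock_alt
  rw [foldA, splitOn_eq_split1]
  have hj := join_altRec (split1 text.toList) 0
  simp only [Nat.cast_zero] at hj
  rw [hj, runA_eq_altRec]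
  simp
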